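-- pv_equiv track=rewrite | github.com/abadithela/NFM2021_Static_Test_Synthesis | src/milp_functions.py | check_cycle_in_flow
-- ===== SOURCE A (Python) =====
-- def check_cycle_in_flow(P, Q0=None):
--     is_P_good = True # default
--     for ii in range(len(P)):
--         vP_ii = P[ii][1:-1]
--         vP_rest  = []
--         if ii < len(P):
--             for jj in range(ii+1, len(P)):
--                 vP_rest.extend(P[jj])
--         if "q0_aug_nodes" in vP_rest:
--             vP_rest.extend(Q0)           # If there are initial states Q0, adding all nodes connected to vP_rest so that cycles are not missed
--         for v in vP_ii:
--             if v in vP_rest: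
--                 is_P_good = False
--     return is_P_good
-- ===== SOURCE B (Python) =====
-- def check_cycle_in_flow(P, Q0=None):
--     # One backward pass keeping a running set of all nodes of later paths.
--     q0set = set(Q0) if Q0 else set()
--     seen = set()
--     for path in reversed(P):
--         extra = q0set if "q0_aug_nodes" in seen else set()
--         for v in path[1:-1]:
--             if v in seen or v in extra:
--                 return False
--         seen.update(path)
--     return True
-- ===== Notes on version B (the rewrite author's own statement) =====
-- stated objective: faster
-- what changed: Replaces the per-index rebuild of the concatenated suffix (nested index loops plus linear list membership) by one backward pass that maintains an incremental set of later-path nodes with O(1) membership and exits on the first hit.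
import Mathlib
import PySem

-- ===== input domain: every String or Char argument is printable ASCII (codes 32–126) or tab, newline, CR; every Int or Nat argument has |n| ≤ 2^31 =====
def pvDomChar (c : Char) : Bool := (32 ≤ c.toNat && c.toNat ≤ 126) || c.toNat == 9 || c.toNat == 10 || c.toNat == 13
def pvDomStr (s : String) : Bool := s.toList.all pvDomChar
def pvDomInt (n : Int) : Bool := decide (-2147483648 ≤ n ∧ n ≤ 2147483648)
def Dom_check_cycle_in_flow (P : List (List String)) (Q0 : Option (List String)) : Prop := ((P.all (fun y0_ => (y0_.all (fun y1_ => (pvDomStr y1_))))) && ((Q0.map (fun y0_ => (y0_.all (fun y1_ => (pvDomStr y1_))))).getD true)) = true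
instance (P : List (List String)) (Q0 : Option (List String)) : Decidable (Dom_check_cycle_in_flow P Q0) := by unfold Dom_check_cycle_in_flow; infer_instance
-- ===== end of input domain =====

-- B makes one backward pass with an incremental node set instead of rebuilding the
-- concatenated suffix for every index (objective: faster, asymptotic).

-- ===== PORT A =====
def check_cycle_in_flow (P : List (List String)) (Q0 : Option (List String)) : Bool :=
  (PySem.List.pyRange 0 (PySem.List.len P)).foldl (fun is_P_good ii =>
    let vP_ii := PySem.List.slice (PySem.List.pyGetD P ii []) (some 1) (some (-1))
    let vP_rest : List String :=
      if ii < PySem.List.len P then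
        (PySem.List.pyRange (ii + 1) (PySem.List.len P)).foldl
          (fun acc jj => acc ++ PySem.List.pyGetD P jj []) []
      else []
    -- Python's 'vP_rest.extend(Q0)' raises TypeError when Q0 is None: that case is
    -- excluded by Pre_check_cycle_in_flow; the port uses Q0.getD [] there.
    let vP_rest := if vP_rest.contains "q0_aug_nodes" then vP_rest ++ Q0.getD [] else vP_rest
    vP_ii.foldl (fun g v => if vP_rest.contains v then false else g) is_P_good) true

-- ===== PORT B =====
def cycAltGo (q0set : PySem.Set String) : List (List String) → PySem.Set String → Bool
  | [], _ => true
  | path :: rest, seen =>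
    let extra : PySem.Set String :=
      if seen.contains "q0_aug_nodes" then q0set else PySem.Set.empty
    if (PySem.List.slice path (some 1) (some (-1))).any
        (fun v => seen.contains v || extra.contains v) then false
    else cycAltGo q0set rest (seen.update path)

def check_cycle_in_flow_alt (P : List (List String)) (Q0 : Option (List String)) : Bool :=
  cycAltGo (PySem.Set.ofList (Q0.getD [])) P.reverse PySem.Set.empty

-- ===== PRECONDITION & SPEC =====
-- Pre_ excludes exactly the inputs where A raises TypeError: Q0 is None while
-- "q0_aug_nodes" occurs in some path after the first (vP_rest.extend(None)).
def Pre_check_cycle_in_flow (P : List (List String)) (Q0 : Option (List String)) : Prop :=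
  Q0.isSome = true ∨ "q0_aug_nodes" ∉ (P.drop 1).flatten
instance (P : List (List String)) (Q0 : Option (List String)) : Decidable (Pre_check_cycle_in_flow P Q0) := by unfold Pre_check_cycle_in_flow; infer_instance

def pvWitness_check_cycle_in_flow : List (List String) × Option (List String) :=
  ([["a", "b", "c"], ["c", "d"]], none)

def Spec_check_cycle_in_flow (P : List (List String)) (Q0 : Option (List String)) (out : Bool) : Prop := out = check_cycle_in_flow_alt P Q0
instance (P : List (List String)) (Q0 : Option (List String)) (out : Bool) : Decidable (Spec_check_cycle_in_flow P Q0 out) := by unfold Spec_check_cycle_in_flow; infer_instance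

-- ===== CLAIM (what is proved, stated in full; the proofs are below) =====
def Claim_equal_check_cycle_in_flow : Prop := ∀ (P : List (List String)) (Q0 : Option (List String)), Dom_check_cycle_in_flow P Q0 → Pre_check_cycle_in_flow P Q0 → Spec_check_cycle_in_flow P Q0 (check_cycle_in_flow P Q0)


-- ===== LEMMAS AND PROOFS =====

-- Common reference form: does v hit the suffix node list `rest` (with the Q0 extension)?
def cycHit (q0l rest : List String) (v : String) : Bool :=
  rest.contains v || (rest.contains "q0_aug_nodes" && q0l.contains v)

def cycBad (q0l rest p : List String) : Bool :=
  (PySem.List.slice p (some 1) (some (-1))).any (cycHit q0l rest)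

-- Reference recursion with an explicit tail context T of extra suffix nodes.
def cycRef (q0l : List String) : List (List String) → List String → Bool
  | [], _ => true
  | p :: ps, T => !cycBad q0l (ps.flatten ++ T) p && cycRef q0l ps T

theorem cycRef_cons (q0l p : List String) (ps : List (List String)) (T : List String) :
    cycRef q0l (p :: ps) T = (!cycBad q0l (ps.flatten ++ T) p && cycRef q0l ps T) := rfl

theorem foldl_if_false {α : Type} (c : α → Bool) :
    ∀ (l : List α) (b : Bool),
      l.foldl (fun g v => if c v then false else g) b = (b && !l.any c) := by
  intro l
  induction l with
  | nil => simp
  | cons x xs ih =>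
    intro b
    by_cases h : c x = true <;>
      simp only [List.foldl_cons, List.any_cons, h, if_true, ih] <;>
      cases b <;> simp

theorem foldl_and {α : Type} (f : α → Bool) :
    ∀ (l : List α) (b : Bool), l.foldl (fun g x => g && f x) b = (b && l.all f) := by
  intro l
  induction l with
  | nil => simp
  | cons x xs ih => intro b; simp [List.foldl_cons, ih, Bool.and_assoc]

theorem foldl_append_acc {α : Type} :
    ∀ (l : List (List α)) (acc : List α), l.foldl (· ++ ·) acc = acc ++ l.flatten := by
  intro l
  induction l with
  | nil => simp
  | cons x xs ih => intro acc; simp [List.foldl_cons, ih]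

theorem contains_append_q0 (q0l rest : List String) (v : String) :
    (if rest.contains "q0_aug_nodes" then rest ++ q0l else rest).contains v
      = cycHit q0l rest v := by
  unfold cycHit
  by_cases h : "q0_aug_nodes" ∈ rest <;> simp [h, List.mem_append]

-- a Set and a plain list with the same members agree on `contains`
theorem set_contains_eq {u : PySem.Set String} {ul : List String}
    (hu : ∀ x, x ∈ u ↔ x ∈ ul) (x : String) : u.contains x = ul.contains x := by
  by_cases hx : x ∈ ul
  · have h1 : u.contains x = true := (PySem.Set.contains_iff u x).2 ((hu x).2 hx)
    have h2 : ul.contains x = true := by simp [hx]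
    rw [h1, h2]
  · have h1 : u.contains x = false := by
      rw [Bool.eq_false_iff]; intro h; exact hx ((hu x).1 ((PySem.Set.contains_iff u x).1 h))
    have h2 : ul.contains x = false := by simp [hx]
    rw [h1, h2]

-- A equals the all-over-indices characterisation, then cycRef with empty context.
theorem check_eq_all (P : List (List String)) (Q0 : Option (List String)) :
    check_cycle_in_flow P Q0
      = (List.range P.length).all
          (fun k => !cycBad (Q0.getD []) ((P.drop (k + 1)).flatten) (P.getD k [])) := by
  unfold check_cycle_in_flow
  rw [PySem.List.pyRange_one]
  rw [List.foldl_map]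
  rw [PySem.List.foldl_congr_mem _ _
    (fun b (k : Nat) => b && !cycBad (Q0.getD []) ((P.drop (k + 1)).flatten) (P.getD k [])) _
    ?_]
  · rw [foldl_and]
    norm_num [PySem.List.len]
  · intro b k hk
    simp only [List.mem_range, PySem.List.len] at hk
    have hklt : ((k : Int)) < ((P.length : Int)) := by omega
    simp only [zero_add, PySem.List.len]
    have hrest :
        (PySem.List.pyRange ((k : Int) + 1) (PySem.List.len P)).foldl
          (fun acc jj => acc ++ PySem.List.pyGetD P jj []) ([] : List String)
        = (P.drop (k + 1)).flatten := by
      rw [PySem.List.foldl_pyRange_pyGetD P [] (fun acc x => acc ++ x) [] (by positivity),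
        foldl_append_acc]
      have h1 : ((k : Int) + 1).toNat = k + 1 := by omega
      rw [h1]
      simp
    simp only [PySem.List.len] at hrest
    rw [if_pos hklt, hrest]
    rw [foldl_if_false]
    simp only [PySem.List.pyGetD_natCast, cycBad]
    have hfun : ∀ v,
        (if ((P.drop (k + 1)).flatten).contains "q0_aug_nodes"
          then (P.drop (k + 1)).flatten ++ Q0.getD [] else (P.drop (k + 1)).flatten).contains v
          = cycHit (Q0.getD []) ((P.drop (k + 1)).flatten) v :=
      contains_append_q0 (Q0.getD []) ((P.drop (k + 1)).flatten)
    exact congrArg (fun f => b && !(PySem.List.slice (P.getD k []) (some 1) (some (-1))).any f)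
      (funext hfun)

theorem all_range_eq_cycRef (q0l : List String) :
    ∀ (P : List (List String)),
      (List.range P.length).all
          (fun k => !cycBad q0l ((P.drop (k + 1)).flatten) (P.getD k []))
        = cycRef q0l P [] := by
  intro P
  induction P with
  | nil => simp [cycRef]
  | cons p ps ih =>
    rw [List.length_cons, List.range_succ_eq_map, List.all_cons, List.all_map, cycRef_cons]
    have h0 : (!cycBad q0l (((p :: ps).drop (0 + 1)).flatten) ((p :: ps).getD 0 []))
        = !cycBad q0l (ps.flatten ++ []) p := by simp
    rw [h0, ← ih]
    congr 1

theorem cycAltGo_append (q0set : PySem.Set String) :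
    ∀ (l1 l2 : List (List String)) (s : PySem.Set String),
      cycAltGo q0set (l1 ++ l2) s
        = (cycAltGo q0set l1 s && cycAltGo q0set l2 (l1.foldl PySem.Set.update s)) := by
  intro l1
  induction l1 with
  | nil => intro l2 s; simp [cycAltGo]
  | cons p ps ih =>
    intro l2 s
    simp only [List.cons_append, List.foldl_cons]
    show (if ((PySem.List.slice p (some 1) (some (-1))).any
        (fun v => s.contains v ||
          (if s.contains "q0_aug_nodes" then q0set else PySem.Set.empty).contains v)) = true
      then false else cycAltGo q0set (ps ++ l2) (s.update p)) =
      ((if ((PySem.List.slice p (some 1) (some (-1))).any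
        (fun v => s.contains v ||
          (if s.contains "q0_aug_nodes" then q0set else PySem.Set.empty).contains v)) = true
      then false else cycAltGo q0set ps (s.update p)) &&
        cycAltGo q0set l2 (ps.foldl PySem.Set.update (s.update p)))
    by_cases hb : ((PySem.List.slice p (some 1) (some (-1))).any
        (fun v => s.contains v ||
          (if s.contains "q0_aug_nodes" then q0set else PySem.Set.empty).contains v)) = true
    · rw [if_pos hb, if_pos hb]
      simp
    · rw [if_neg hb, if_neg hb]
      exact ih l2 (s.update p)

theorem mem_foldl_update (l : List (List String)) :
    ∀ (s : PySem.Set String) (x : String),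
      x ∈ l.foldl PySem.Set.update s ↔ x ∈ s ∨ x ∈ l.flatten := by
  induction l with
  | nil => simp
  | cons p ps ih =>
    intro s x
    simp only [List.foldl_cons, ih, PySem.Set.mem_update, List.flatten_cons, List.mem_append]
    tauto

theorem cycHit_iff (q0l rest : List String) (v : String)
    (seen : PySem.Set String) (hseen : ∀ x, x ∈ seen ↔ x ∈ rest)
    (q0set : PySem.Set String) (hq0 : ∀ x, x ∈ q0set ↔ x ∈ q0l) :
    (seen.contains v
      || (if seen.contains "q0_aug_nodes" then q0set else PySem.Set.empty).contains v)
      = cycHit q0l rest v := by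
  unfold cycHit
  rw [set_contains_eq hseen v, set_contains_eq hseen "q0_aug_nodes"]
  by_cases h : rest.contains "q0_aug_nodes" = true
  · rw [h, if_pos rfl, set_contains_eq hq0 v]
    simp
  · rw [Bool.eq_false_iff.2 h]
    simp [PySem.Set.empty]

theorem cycAltGo_reverse (q0l : List String) (q0set : PySem.Set String)
    (hq0 : ∀ x, x ∈ q0set ↔ x ∈ q0l) :
    ∀ (P : List (List String)) (T : List String) (seen : PySem.Set String),
      (∀ x, x ∈ seen ↔ x ∈ T) →
      cycAltGo q0set P.reverse seen = cycRef q0l P T := by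
  intro P
  induction P with
  | nil => intro T seen _; rfl
  | cons p ps ih =>
    intro T seen hseen
    have hT' : ∀ x, x ∈ ps.reverse.foldl PySem.Set.update seen ↔ x ∈ ps.flatten ++ T := by
      intro x
      rw [mem_foldl_update, hseen x, List.mem_append]
      simp only [List.mem_flatten, List.mem_reverse]
      exact or_comm
    have hone : cycAltGo q0set [p] (ps.reverse.foldl PySem.Set.update seen)
        = !cycBad q0l (ps.flatten ++ T) p := by
      have hany : ((PySem.List.slice p (some 1) (some (-1))).any
          (fun v => (ps.reverse.foldl PySem.Set.update seen).contains v ||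
            (if (ps.reverse.foldl PySem.Set.update seen).contains "q0_aug_nodes"
              then q0set else PySem.Set.empty).contains v))
          = cycBad q0l (ps.flatten ++ T) p := by
        unfold cycBad
        exact congrArg _ (funext fun v =>
          cycHit_iff q0l (ps.flatten ++ T) v _ hT' q0set hq0)
      show (if ((PySem.List.slice p (some 1) (some (-1))).any
          (fun v => (ps.reverse.foldl PySem.Set.update seen).contains v ||
            (if (ps.reverse.foldl PySem.Set.update seen).contains "q0_aug_nodes"
              then q0set else PySem.Set.empty).contains v)) = true then false
        else cycAltGo q0set [] ((ps.reverse.foldl PySem.Set.update seen).update p)) = _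
      rw [hany]
      rcases hcb : cycBad q0l (ps.flatten ++ T) p with _ | _
      · simp [cycAltGo]
      · simp
    rw [List.reverse_cons, cycAltGo_append, ih T seen hseen, hone, cycRef_cons, Bool.and_comm]

theorem alt_eq_cycRef (P : List (List String)) (Q0 : Option (List String)) :
    check_cycle_in_flow_alt P Q0 = cycRef (Q0.getD []) P [] := by
  unfold check_cycle_in_flow_alt
  exact cycAltGo_reverse (Q0.getD []) _ (fun x => by simp [PySem.Set.mem_ofList]) P []
    PySem.Set.empty (fun x => by simp [PySem.Set.empty])

-- ===== VERDICT (by name: the statement is the Claim_ definition above) =====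
theorem check_cycle_in_flow_spec : Claim_equal_check_cycle_in_flow := by
  intro P Q0 _ _
  unfold Spec_check_cycle_in_flow
  rw [check_eq_all, all_range_eq_cycRef, alt_eq_cycRef]
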